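-- pv_equiv track=rewrite | github.com/Samirsaurio/ledger-cli | ledger.py | getTransactionName
-- ===== SOURCE A (Python) =====
-- def getTransactionName(strline):
--     """
--     Get the name of the whole movement
--     """
--     if strline.startswith("2"):
--         switch = False
--         words = []
--         for l in strline:
--             if l in allowed and l != " ":
--                 switch = True
--             if switch == True:
--                 words.append(l)
--         tname = ''.join(words).strip("\n")
--         return tname
--
-- allowed = ["-", " ", "A", "B", "C", "D", "E", "F", "G", "H", "I", "J", "K", "L", "M",
-- "N", "O", "P", "Q", "R", "S", "T", "U", "V", "W", "X", "Y", "Z", ":",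
-- "a", "b", "c", "d", "e", "f", "g", "h", "i", "j", "k", "l",
-- "m", "n", "o", "p", "q", "r", "s", "t", "u",
-- "v", "w", "x", "y", "z"]
-- ===== SOURCE B (Python) =====
-- # B: find the first triggering index, then slice and strip -- instead of a flag-and-accumulate loop.
-- ALLOWED = set("- ABCDEFGHIJKLMNOPQRSTUVWXYZ:abcdefghijklmnopqrstuvwxyz")
--
-- def getTransactionName(strline):
--     """
--     Get the name of the whole movement
--     """
--     if not strline.startswith("2"):
--         return None
--     for i, l in enumerate(strline):
--         if l in ALLOWED and l != " ":
--             return strline[i:].strip("\n")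
--     return ""
-- ===== Notes on version B (the rewrite author's own statement) =====
-- stated objective: simpler
-- what changed: B replaces A's flag-and-accumulate loop over every character with an enumerate scan for the first triggering index followed by a single slice-and-strip.
import Mathlib
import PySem

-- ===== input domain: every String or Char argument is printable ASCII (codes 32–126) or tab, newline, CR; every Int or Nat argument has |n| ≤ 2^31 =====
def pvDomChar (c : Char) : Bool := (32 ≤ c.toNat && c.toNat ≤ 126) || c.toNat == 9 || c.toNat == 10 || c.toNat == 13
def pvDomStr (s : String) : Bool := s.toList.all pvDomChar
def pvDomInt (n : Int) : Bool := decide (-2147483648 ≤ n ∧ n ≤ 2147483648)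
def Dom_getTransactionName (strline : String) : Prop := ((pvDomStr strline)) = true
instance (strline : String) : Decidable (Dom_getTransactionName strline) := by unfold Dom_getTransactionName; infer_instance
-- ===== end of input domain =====

-- B replaces A's flag-and-accumulate loop with a find-first-trigger-index scan followed by one slice-and-strip (objective: simpler).

-- ===== PORT A =====
-- the module-level 'allowed' list: "-", " ", A..Z, ":", a..z, in A's order
def pvAllowed : List Char := "- ABCDEFGHIJKLMNOPQRSTUVWXYZ:abcdefghijklmnopqrstuvwxyz".toList

def getTransactionName (strline : String) : Option String :=
  if PySem.Str.startswith strline "2" then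
    -- switch = False; words = []; for l in strline: …
    let st := strline.toList.foldl
      (fun (acc : Bool × List Char) l =>
        let sw := if decide (l ∈ pvAllowed) && (l != ' ') then true else acc.1
        let words := if sw then acc.2 ++ [l] else acc.2
        (sw, words))
      (false, [])
    -- tname = ''.join(words).strip("\n")
    some (String.ofList (PySem.Chars.stripChars st.2 "\n".toList))
  else
    none

-- ===== PORT B =====
-- ALLOWED = set("- ABC…:abc…")
def pvAllowedSet : PySem.Set Char :=
  PySem.Set.ofList "- ABCDEFGHIJKLMNOPQRSTUVWXYZ:abcdefghijklmnopqrstuvwxyz".toList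

def getTransactionName_alt (strline : String) : Option String :=
  if !PySem.Str.startswith strline "2" then
    none
  else
    match strline.toList.findIdx? (fun l => decide (l ∈ pvAllowedSet) && (l != ' ')) with
    | some i => some (String.ofList (PySem.Chars.stripChars (strline.toList.drop i) "\n".toList))
    | none => some ""

-- ===== PRECONDITION & SPEC =====
def Spec_getTransactionName (strline : String) (out : Option String) : Prop := out = getTransactionName_alt strline
instance (strline : String) (out : Option String) : Decidable (Spec_getTransactionName strline out) := by unfold Spec_getTransactionName; infer_instance

-- ===== CLAIM (what is proved, stated in full; the proofs are below) =====
def Claim_equal_getTransactionName : Prop := ∀ (strline : String), Dom_getTransactionName strline → Spec_getTransactionName strline (getTransactionName strline)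

-- ===== LEMMAS AND PROOFS =====

-- the shared trigger predicate
def pvTrig (l : Char) : Bool := decide (l ∈ pvAllowed) && (l != ' ')

lemma pvTrig_eq_B (l : Char) :
    (decide (l ∈ pvAllowedSet) && (l != ' ')) = pvTrig l := by
  simp [pvTrig, pvAllowedSet, PySem.Set.mem_ofList, pvAllowed]

-- A's loop body
def pvStep (acc : Bool × List Char) (l : Char) : Bool × List Char :=
  let sw := if pvTrig l then true else acc.1
  let words := if sw then acc.2 ++ [l] else acc.2
  (sw, words)

lemma foldl_pvStep_true (cs : List Char) (ws : List Char) :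
    cs.foldl pvStep (true, ws) = (true, ws ++ cs) := by
  induction cs generalizing ws with
  | nil => simp
  | cons c cs ih =>
      simp only [List.foldl_cons, pvStep]
      cases h : pvTrig c <;> simp [ih]

lemma foldl_pvStep_false (cs : List Char) :
    (cs.foldl pvStep (false, [])).2 =
      match cs.findIdx? pvTrig with
      | some i => cs.drop i
      | none => [] := by
  induction cs with
  | nil => simp
  | cons c cs ih =>
      by_cases h : pvTrig c = true
      · simp only [List.foldl_cons, pvStep, h, if_true, List.findIdx?_cons]
        rw [foldl_pvStep_true cs ([] ++ [c])]; simp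
      · rw [Bool.not_eq_true] at h
        simp only [List.foldl_cons, pvStep, h, List.findIdx?_cons, Bool.false_eq_true,
          if_false, List.nil_append]
        rw [ih]
        cases hf : cs.findIdx? pvTrig <;> simp

-- ===== VERDICT (by name: the statement is the Claim_ definition above) =====
theorem getTransactionName_spec : Claim_equal_getTransactionName := by
  intro strline _
  unfold Spec_getTransactionName getTransactionName getTransactionName_alt
  cases hs : PySem.Str.startswith strline "2" with
  | false => simp
  | true =>
      simp only [Bool.not_true, Bool.false_eq_true, if_false, if_true]
      have hb : (fun l => decide (l ∈ pvAllowedSet) && (l != ' ')) = pvTrig := by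
        funext l; exact pvTrig_eq_B l
      have ha : (fun (acc : Bool × List Char) l =>
          let sw := if decide (l ∈ pvAllowed) && (l != ' ') then true else acc.1
          let words := if sw then acc.2 ++ [l] else acc.2
          (sw, words)) = pvStep := by
        funext acc l; simp [pvStep, pvTrig]
      rw [hb, ha, ]
      have := foldl_pvStep_false strline.toList
      cases hf : strline.toList.findIdx? pvTrig with
      | some i => rw [hf] at this; simp [this]
      | none => rw [hf] at this; simp [this, PySem.Chars.stripChars]
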